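-- pv_equiv track=rewrite | github.com/SMilanchev/Advanced | python_advanced/Exams/October_24/Checkmate.py | check_rows
-- ===== SOURCE A (Python) =====
-- def check_rows(matrix, current_row, current_col):
--     queens_coords = []
--     row = matrix[current_row]
--     if "Q" in row:
--         for i in range(current_col-1, -1, -1):
--             if row[i] == "Q":
--                 queens_coords.append([current_row, i])
--                 break
--         for m in range(current_col + 1, 8):
--             if row[m] == "Q":
--                 queens_coords.append([current_row, m])
--                 break
--     return queens_coords
-- ===== SOURCE B (Python) =====
-- def check_rows(matrix, current_row, current_col):
--     row = matrix[current_row]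
--     positions = [j for j, c in enumerate(row) if c == "Q"]
--     queens_coords = []
--     left = [j for j in positions if j < current_col]
--     if left:
--         queens_coords.append([current_row, max(left)])
--     right = [j for j in positions if current_col < j < 8]
--     if right:
--         queens_coords.append([current_row, min(right)])
--     return queens_coords
-- ===== Notes on version B (the rewrite author's own statement) =====
-- stated objective: alternative
-- what changed: Replaces the two outward break-early index scans with a single enumerate pass building the list of queen columns, then max/min selection over filtered position lists (left-then-right append order kept).
-- outside the precondition, e.g. on check_rows([['Q', '.', '.', '.', '.', '.', 'Q', '.']], 0, -3): A returns [[0, -2]], B returns [[0, 0]]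
import Mathlib
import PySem

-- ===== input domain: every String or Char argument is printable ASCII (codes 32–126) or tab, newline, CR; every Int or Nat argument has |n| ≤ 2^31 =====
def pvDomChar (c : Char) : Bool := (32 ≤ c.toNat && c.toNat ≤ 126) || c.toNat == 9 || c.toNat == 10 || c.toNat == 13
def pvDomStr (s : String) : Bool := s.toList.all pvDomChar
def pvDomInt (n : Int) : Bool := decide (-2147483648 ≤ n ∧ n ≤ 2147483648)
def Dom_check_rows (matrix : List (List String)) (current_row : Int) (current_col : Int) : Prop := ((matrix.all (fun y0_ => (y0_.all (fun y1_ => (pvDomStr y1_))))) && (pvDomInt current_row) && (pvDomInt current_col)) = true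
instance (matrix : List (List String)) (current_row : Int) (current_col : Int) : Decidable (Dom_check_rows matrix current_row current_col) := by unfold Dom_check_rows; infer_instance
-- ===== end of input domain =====

-- ===== PORT A =====
-- B replaces A's two outward break-early scans by one enumerate pass collecting queen
-- columns followed by max/min selection; equivalence proved on Pre_ (in-range row index,
-- and for rows containing "Q" a column in 0..8 with row length >= 8).

-- the body of each 'for ... break' loop of A: scan the index list, append at the first "Q"
def pvFindQ (row : List String) (r : Int) (idxs : List Int) (acc : List (List Int)) : List (List Int) :=
  match idxs with
  | [] => acc
  | i :: rest =>
    match PySem.List.pyGet? row i with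
    | none => acc            -- IndexError in Python; such inputs are outside Pre_check_rows
    | some c => if c == "Q" then acc ++ [[r, i]] else pvFindQ row r rest acc

def check_rows (matrix : List (List String)) (current_row : Int) (current_col : Int) : List (List Int) :=
  match PySem.List.pyGet? matrix current_row with
  | none => []               -- IndexError in Python; outside Pre_check_rows
  | some row =>
    if "Q" ∈ row then
      let acc := pvFindQ row current_row (PySem.List.pyRange (current_col - 1) (-1) (-1)) []
      pvFindQ row current_row (PySem.List.pyRange (current_col + 1) 8 1) acc
    else []

-- ===== PORT B =====
def check_rows_alt (matrix : List (List String)) (current_row : Int) (current_col : Int) : List (List Int) :=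
  match PySem.List.pyGet? matrix current_row with
  | none => []               -- IndexError in Python; outside Pre_check_rows
  | some row =>
    let positions : List Int :=
      (((PySem.List.enumerate row).filter (fun p => p.2 == "Q")).map (fun p => p.1))
    let left := positions.filter (fun j => decide (j < current_col))
    let acc : List (List Int) :=
      match PySem.List.max? left (fun y => y) with
      | some m => [[current_row, m]]
      | none => []
    let right := positions.filter (fun j => decide (current_col < j) && decide (j < 8))
    match PySem.List.min? right (fun y => y) with
    | some m => acc ++ [[current_row, m]]
    | none => acc

-- ===== PRECONDITION & SPEC =====
-- Pre_ excludes out-of-range row indices (IndexError) and, when the selected row contains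
-- "Q", the columns on which A's outward scans raise IndexError, plus negative columns,
-- where A's right scan indexes with Python's negative wraparound and can report a negative
-- column.
def Pre_check_rows (matrix : List (List String)) (current_row : Int) (current_col : Int) : Prop :=
  PySem.Raise.InRange matrix.length current_row ∧
  ("Q" ∈ PySem.List.pyGetD matrix current_row [] →
    0 ≤ current_col ∧
    current_col ≤ ((PySem.List.pyGetD matrix current_row []).length : Int) ∧
    (8 ≤ ((PySem.List.pyGetD matrix current_row []).length : Int) ∨ 7 ≤ current_col ∨
      "Q" ∈ (PySem.List.pyGetD matrix current_row []).drop (current_col + 1).toNat))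
instance (matrix : List (List String)) (current_row : Int) (current_col : Int) : Decidable (Pre_check_rows matrix current_row current_col) := by unfold Pre_check_rows; infer_instance

def pvWitness_check_rows : List (List String) × Int × Int :=
  ([[".", ".", "Q", ".", ".", ".", "Q", "."]], 0, 5)

def Spec_check_rows (matrix : List (List String)) (current_row : Int) (current_col : Int) (out : List (List Int)) : Prop := out = check_rows_alt matrix current_row current_col
instance (matrix : List (List String)) (current_row : Int) (current_col : Int) (out : List (List Int)) : Decidable (Spec_check_rows matrix current_row current_col out) := by unfold Spec_check_rows; infer_instance

-- ===== CLAIM (what is proved, stated in full; the proofs are below) =====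
def Claim_equal_check_rows : Prop := ∀ (matrix : List (List String)) (current_row : Int) (current_col : Int), Dom_check_rows matrix current_row current_col → Pre_check_rows matrix current_row current_col → Spec_check_rows matrix current_row current_col (check_rows matrix current_row current_col)

-- ===== LEMMAS AND PROOFS =====

-- the value found by a break-early scan over an index list
def pvFirstQ (row : List String) : List Int → Option Int
  | [] => none
  | i :: rest => if PySem.List.pyGetD row i "" == "Q" then some i else pvFirstQ row rest

theorem pvFindQ_eq_firstQ (row : List String) (r : Int) (idxs : List Int) (acc : List (List Int))
    (h : ∀ i ∈ idxs, PySem.Raise.InRange row.length i) :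
    pvFindQ row r idxs acc =
      match pvFirstQ row idxs with
      | some i => acc ++ [[r, i]]
      | none => acc := by
  induction idxs with
  | nil => rfl
  | cons i rest ih =>
    have hi : PySem.Raise.InRange row.length i := h i (by simp)
    have hsome : PySem.List.pyGet? row i ≠ none := by
      intro hn
      exact ((PySem.List.pyGet?_eq_none_iff row i).mp hn) hi
    obtain ⟨c, hc⟩ := Option.ne_none_iff_exists'.mp hsome
    have hd : PySem.List.pyGetD row i "" = c := by
      simp [PySem.List.pyGetD, hc]
    simp only [pvFindQ, pvFirstQ, hc, hd]
    by_cases hq : c = "Q"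
    · simp [hq]
    · simp only [beq_iff_eq, if_neg hq]
      rw [ih (fun j hj => h j (by simp [hj]))]

theorem pvFoldlMax_le (t : List Int) (x a : Int) (hx : x ≤ a) (h : ∀ y ∈ t, y ≤ a) :
    t.foldl max x ≤ a := by
  induction t generalizing x with
  | nil => exact hx
  | cons y t ih =>
    exact ih (max x y) (max_le hx (h y (by simp))) (fun z hz => h z (by simp [hz]))

theorem pvMaxLast (l : List Int) (a : Int) (h : ∀ x ∈ l, x ≤ a) :
    PySem.List.max? (l ++ [a]) (fun y => y) = some a := by
  cases l with
  | nil => simp [PySem.List.max?_id_cons]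
  | cons x t =>
    rw [List.cons_append, PySem.List.max?_id_cons, List.foldl_append]
    have h1 : t.foldl max x ≤ a :=
      pvFoldlMax_le t x a (h x (by simp)) (fun y hy => h y (by simp [hy]))
    simp [max_eq_right h1]

theorem pvFoldlMin_le (t : List Int) (x a : Int) (hx : a ≤ x) (h : ∀ y ∈ t, a ≤ y) :
    a ≤ t.foldl min x := by
  induction t generalizing x with
  | nil => exact hx
  | cons y t ih =>
    exact ih (min x y) (le_min hx (h y (by simp))) (fun z hz => h z (by simp [hz]))

-- descending break-early scan = max of the (ascending) matching indices
theorem pvFoldlMin_le_init (t : List Int) (x : Int) : t.foldl min x ≤ x := by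
  induction t generalizing x with
  | nil => simp
  | cons y t ih => exact le_trans (ih (min x y)) (min_le_left x y)

theorem pvFirstQ_desc (row : List String) (l : List Int) (h : l.Pairwise (· > ·)) :
    pvFirstQ row l =
      PySem.List.max? (l.reverse.filter (fun j => PySem.List.pyGetD row j "" == "Q")) (fun y => y) := by
  induction l with
  | nil =>
    simp only [pvFirstQ, List.reverse_nil, List.filter_nil]
    exact ((PySem.List.max?_eq_none_iff _ _).mpr rfl).symm
  | cons i t ih =>
    rw [List.pairwise_cons] at h
    rw [List.reverse_cons, List.filter_append]
    by_cases hq : PySem.List.pyGetD row i "" = "Q"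
    · have hone : List.filter (fun j => PySem.List.pyGetD row j "" == "Q") [i] = [i] := by
        simp [hq]
      simp only [pvFirstQ, hq, beq_self_eq_true, if_pos trivial, hone]
      rw [pvMaxLast]
      intro x hx
      have hxt : x ∈ t := by
        have := List.mem_reverse.mp (List.mem_of_mem_filter hx)
        exact this
      exact le_of_lt (h.1 x hxt)
    · have hone : List.filter (fun j => PySem.List.pyGetD row j "" == "Q") [i] = [] := by
        simp [hq]
      simp only [pvFirstQ, beq_iff_eq, if_neg hq, hone, List.append_nil]
      exact ih h.2

-- ascending break-early scan = min of the matching indices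
theorem pvFirstQ_asc (row : List String) (l : List Int) (h : l.Pairwise (· < ·)) :
    pvFirstQ row l =
      PySem.List.min? (l.filter (fun j => PySem.List.pyGetD row j "" == "Q")) (fun y => y) := by
  induction l with
  | nil =>
    simp only [pvFirstQ, List.filter_nil]
    exact ((PySem.List.min?_eq_none_iff _ _).mpr rfl).symm
  | cons i t ih =>
    rw [List.pairwise_cons] at h
    by_cases hq : PySem.List.pyGetD row i "" = "Q"
    · rw [List.filter_cons_of_pos (by simp [hq])]
      simp only [pvFirstQ, hq, beq_self_eq_true, if_pos trivial]
      rw [PySem.List.min?_id_cons]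
      have h1 : i ≤ (t.filter (fun j => PySem.List.pyGetD row j "" == "Q")).foldl min i :=
        pvFoldlMin_le _ i i le_rfl (fun y hy => le_of_lt (h.1 y (List.mem_of_mem_filter hy)))
      have h2 := pvFoldlMin_le_init (t.filter (fun j => PySem.List.pyGetD row j "" == "Q")) i
      rw [le_antisymm h2 h1]
    · rw [List.filter_cons_of_neg (by simp [hq])]
      simp only [pvFirstQ, beq_iff_eq, if_neg hq]
      exact ih h.2

theorem pvFirstQ_isSome_of_mem (row : List String) (l : List Int) (i : Int)
    (hi : i ∈ l) (hq : PySem.List.pyGetD row i "" = "Q") :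
    pvFirstQ row l ≠ none := by
  induction l with
  | nil => simp at hi
  | cons j t ih =>
    by_cases hj : PySem.List.pyGetD row j "" = "Q"
    · simp [pvFirstQ, hj]
    · rcases List.mem_cons.mp hi with h | h
      · exact absurd (h ▸ hq) hj
      · simp only [pvFirstQ, beq_iff_eq, if_neg hj]
        exact ih h

theorem pvFindQ_found (row : List String) (r : Int) (l1 l2 : List Int)
    (acc : List (List Int)) (i : Int) (hfq : pvFirstQ row l1 = some i)
    (h : ∀ j ∈ l1, PySem.Raise.InRange row.length j) :
    pvFindQ row r (l1 ++ l2) acc = acc ++ [[r, i]] := by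
  induction l1 with
  | nil => simp [pvFirstQ] at hfq
  | cons j t ih =>
    have hj : PySem.Raise.InRange row.length j := h j (by simp)
    have hsome : PySem.List.pyGet? row j ≠ none := by
      intro hn
      exact ((PySem.List.pyGet?_eq_none_iff row j).mp hn) hj
    obtain ⟨cc, hcc⟩ := Option.ne_none_iff_exists'.mp hsome
    have hd : PySem.List.pyGetD row j "" = cc := by
      simp [PySem.List.pyGetD, hcc]
    by_cases hqq : cc = "Q"
    · simp only [pvFirstQ, hd, hqq, beq_self_eq_true, if_pos trivial, Option.some_inj] at hfq
      subst hfq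
      simp [pvFindQ, hcc, hqq]
    · simp only [pvFirstQ, hd, beq_iff_eq, if_neg hqq] at hfq
      simp only [List.cons_append, pvFindQ, hcc, beq_iff_eq, if_neg hqq]
      exact ih hfq (fun x hx => h x (by simp [hx]))

theorem pvRightNil (c : Int) (hc : 7 ≤ c) (l : List Int) :
    l.filter (fun j => decide (c < j) && decide (j < 8)) = [] := by
  rw [List.filter_eq_nil_iff]
  intro j _
  simp only [Bool.and_eq_true, decide_eq_true_eq]
  omega

theorem pvRightEqSmall (row : List String) (c : Int) (h0 : 0 ≤ c)
    (hc1 : c + 1 ≤ ((row.length : Int))) (hlen8 : ((row.length : Int)) ≤ 8) :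
    ((PySem.List.pyRange 0 ((row.length : Int)) 1).filter
        (fun j => PySem.List.pyGetD row j "" == "Q")).filter
          (fun j => decide (c < j) && decide (j < 8))
      = (PySem.List.pyRange (c + 1) ((row.length : Int)) 1).filter
          (fun j => PySem.List.pyGetD row j "" == "Q") := by
  rw [PySem.List.pyRange_one_append 0 (c + 1) ((row.length : Int)) (by omega) hc1]
  rw [List.filter_append, List.filter_append]
  have h1 : ((PySem.List.pyRange 0 (c + 1) 1).filter
      (fun j => PySem.List.pyGetD row j "" == "Q")).filter
        (fun j => decide (c < j) && decide (j < 8)) = [] := by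
    rw [List.filter_eq_nil_iff]
    intro j hj
    have := PySem.List.mem_pyRange_one.mp (List.mem_of_mem_filter hj)
    simp only [Bool.and_eq_true, decide_eq_true_eq]
    omega
  have h2 : ((PySem.List.pyRange (c + 1) ((row.length : Int)) 1).filter
      (fun j => PySem.List.pyGetD row j "" == "Q")).filter
        (fun j => decide (c < j) && decide (j < 8))
      = (PySem.List.pyRange (c + 1) ((row.length : Int)) 1).filter
          (fun j => PySem.List.pyGetD row j "" == "Q") := by
    rw [List.filter_eq_self]
    intro j hj
    have := PySem.List.mem_pyRange_one.mp (List.mem_of_mem_filter hj)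
    simp only [Bool.and_eq_true, decide_eq_true_eq]
    omega
  rw [h1, h2, List.nil_append]

theorem pvPositions (row : List String) :
    ((PySem.List.enumerate row).filter (fun p => p.2 == "Q")).map (fun p => p.1)
      = (PySem.List.pyRange 0 ((row.length : Int)) 1).filter
          (fun j => PySem.List.pyGetD row j "" == "Q") := by
  rw [PySem.List.enumerate_eq_map_pyRange row ""]
  simp [List.filter_map, List.map_map, Function.comp_def]

theorem pvLeftEq (row : List String) (c : Int) (h0 : 0 ≤ c) (hcl : c ≤ ((row.length : Int))) :
    ((PySem.List.pyRange 0 ((row.length : Int)) 1).filter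
        (fun j => PySem.List.pyGetD row j "" == "Q")).filter (fun j => decide (j < c))
      = (PySem.List.pyRange 0 c 1).filter (fun j => PySem.List.pyGetD row j "" == "Q") := by
  rw [PySem.List.pyRange_one_append 0 c ((row.length : Int)) h0 hcl]
  rw [List.filter_append, List.filter_append]
  have h1 : ((PySem.List.pyRange c ((row.length : Int)) 1).filter
      (fun j => PySem.List.pyGetD row j "" == "Q")).filter (fun j => decide (j < c)) = [] := by
    rw [List.filter_eq_nil_iff]
    intro j hj
    have := PySem.List.mem_pyRange_one.mp (List.mem_of_mem_filter hj)
    simp only [decide_eq_true_eq]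
    omega
  have h2 : ((PySem.List.pyRange 0 c 1).filter
      (fun j => PySem.List.pyGetD row j "" == "Q")).filter (fun j => decide (j < c))
      = (PySem.List.pyRange 0 c 1).filter (fun j => PySem.List.pyGetD row j "" == "Q") := by
    rw [List.filter_eq_self]
    intro j hj
    have := PySem.List.mem_pyRange_one.mp (List.mem_of_mem_filter hj)
    simp only [decide_eq_true_eq]
    omega
  rw [h1, h2, List.append_nil]

theorem pvRightEq (row : List String) (c : Int) (h0 : 0 ≤ c) (hc7 : c ≤ 7)
    (hL : 8 ≤ ((row.length : Int))) :
    ((PySem.List.pyRange 0 ((row.length : Int)) 1).filter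
        (fun j => PySem.List.pyGetD row j "" == "Q")).filter
          (fun j => decide (c < j) && decide (j < 8))
      = (PySem.List.pyRange (c + 1) 8 1).filter (fun j => PySem.List.pyGetD row j "" == "Q") := by
  rw [PySem.List.pyRange_one_append 0 (c+1) ((row.length : Int)) (by omega) (by omega),
    PySem.List.pyRange_one_append (c+1) 8 ((row.length : Int)) (by omega) hL]
  rw [List.filter_append, List.filter_append, List.filter_append, List.filter_append]
  have h1 : ((PySem.List.pyRange 0 (c+1) 1).filter
      (fun j => PySem.List.pyGetD row j "" == "Q")).filter
        (fun j => decide (c < j) && decide (j < 8)) = [] := by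
    rw [List.filter_eq_nil_iff]
    intro j hj
    have := PySem.List.mem_pyRange_one.mp (List.mem_of_mem_filter hj)
    simp only [Bool.and_eq_true, decide_eq_true_eq]
    omega
  have h2 : ((PySem.List.pyRange (c+1) 8 1).filter
      (fun j => PySem.List.pyGetD row j "" == "Q")).filter
        (fun j => decide (c < j) && decide (j < 8))
      = (PySem.List.pyRange (c+1) 8 1).filter (fun j => PySem.List.pyGetD row j "" == "Q") := by
    rw [List.filter_eq_self]
    intro j hj
    have := PySem.List.mem_pyRange_one.mp (List.mem_of_mem_filter hj)
    simp only [Bool.and_eq_true, decide_eq_true_eq]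
    omega
  have h3 : ((PySem.List.pyRange 8 ((row.length : Int)) 1).filter
      (fun j => PySem.List.pyGetD row j "" == "Q")).filter
        (fun j => decide (c < j) && decide (j < 8)) = [] := by
    rw [List.filter_eq_nil_iff]
    intro j hj
    have := PySem.List.mem_pyRange_one.mp (List.mem_of_mem_filter hj)
    simp only [Bool.and_eq_true, decide_eq_true_eq]
    omega
  rw [h1, h2, h3, List.append_nil, List.nil_append]

-- ===== VERDICT (by name: the statement is the Claim_ definition above) =====
theorem check_rows_spec : Claim_equal_check_rows := by
  intro matrix r c hdom hpre
  obtain ⟨hin, himp⟩ := hpre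
  have hsome : PySem.List.pyGet? matrix r ≠ none := by
    intro hn
    exact ((PySem.List.pyGet?_eq_none_iff matrix r).mp hn) hin
  obtain ⟨row, hrow⟩ := Option.ne_none_iff_exists'.mp hsome
  have hD : PySem.List.pyGetD matrix r [] = row := by
    simp [PySem.List.pyGetD, hrow]
  rw [hD] at himp
  show check_rows matrix r c = check_rows_alt matrix r c
  unfold check_rows check_rows_alt
  rw [hrow]
  simp only [pvPositions]
  by_cases hQ : "Q" ∈ row
  · obtain ⟨h0, hcl, hsafe⟩ := himp hQ
    rw [if_pos hQ]
    -- left scan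
    have hleftrange : PySem.List.pyRange (c - 1) (-1) (-1)
        = (PySem.List.pyRange 0 c 1).reverse := by
      rw [PySem.List.pyRange_neg_one_eq_reverse]
      norm_num
    have hleftin : ∀ i ∈ PySem.List.pyRange (c - 1) (-1) (-1),
        PySem.Raise.InRange row.length i := by
      intro i hi
      have := PySem.List.mem_pyRange_neg_one.mp hi
      constructor <;> omega
    have hleftQ : pvFirstQ row (PySem.List.pyRange (c - 1) (-1) (-1))
        = PySem.List.max? ((PySem.List.pyRange 0 c 1).filter
            (fun j => PySem.List.pyGetD row j "" == "Q")) (fun y => y) := by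
      rw [hleftrange, pvFirstQ_desc row _ (by
        rw [List.pairwise_reverse]
        exact PySem.List.pairwise_lt_pyRange_one 0 c), List.reverse_reverse]
    have eqL : pvFindQ row r (PySem.List.pyRange (c - 1) (-1) (-1)) [] =
        (match PySem.List.max? (((PySem.List.pyRange 0 ((row.length : Int)) 1).filter
            (fun j => PySem.List.pyGetD row j "" == "Q")).filter
              (fun j => decide (j < c))) (fun y => y) with
          | some m => ([[r, m]] : List (List Int))
          | none => []) := by
      rw [pvFindQ_eq_firstQ row r _ _ hleftin, hleftQ, pvLeftEq row c h0 hcl]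
      cases PySem.List.max? ((PySem.List.pyRange 0 c 1).filter
          (fun j => PySem.List.pyGetD row j "" == "Q")) (fun y => y) <;> rfl
    -- right scan
    have eqR : ∀ acc : List (List Int),
        pvFindQ row r (PySem.List.pyRange (c + 1) 8 1) acc =
          (match PySem.List.min? (((PySem.List.pyRange 0 ((row.length : Int)) 1).filter
              (fun j => PySem.List.pyGetD row j "" == "Q")).filter
                (fun j => decide (c < j) && decide (j < 8))) (fun y => y) with
            | some m => acc ++ [[r, m]]
            | none => acc) := by
      intro acc
      by_cases hc7 : 7 ≤ c
      · have hnilR : PySem.List.pyRange (c + 1) 8 1 = [] :=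
          PySem.List.pyRange_one_eq_nil (by omega)
        rw [hnilR, pvRightNil c hc7]
        have hm : PySem.List.min? ([] : List Int) (fun y => y) = none :=
          (PySem.List.min?_eq_none_iff _ _).mpr rfl
        rw [hm]
        rfl
      · by_cases h8L : 8 ≤ ((row.length : Int))
        · -- the row has at least 8 entries: the whole right scan is in range
          have hrightin : ∀ i ∈ PySem.List.pyRange (c + 1) 8 1,
              PySem.Raise.InRange row.length i := by
            intro i hi
            have := PySem.List.mem_pyRange_one.mp hi
            constructor <;> omega
          rw [pvFindQ_eq_firstQ row r _ _ hrightin,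
            pvFirstQ_asc row _ (PySem.List.pairwise_lt_pyRange_one (c + 1) 8),
            pvRightEq row c h0 (by omega) h8L]
        · -- short row: Pre_ guarantees a queen to the right inside the row
          have hdrop : "Q" ∈ row.drop (c + 1).toNat := by
            rcases hsafe with h | h | h
            · omega
            · omega
            · exact h
          have hlt : (c + 1).toNat < row.length := by
            by_contra hge
            rw [List.drop_eq_nil_of_le (by omega)] at hdrop
            simp at hdrop
          have hcast : ((c + 1).toNat : Int) = c + 1 := Int.toNat_of_nonneg (by omega)
          have hc1 : c + 1 ≤ ((row.length : Int)) := by omega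
          obtain ⟨k, hk, hgetk⟩ := List.mem_iff_getElem.mp hdrop
          rw [List.getElem_drop] at hgetk
          have hklen : (c + 1).toNat + k < row.length := by
            have := List.length_drop (l := row) (i := (c + 1).toNat)
            omega
          have hmem : (((c + 1).toNat + k : Nat) : Int)
              ∈ PySem.List.pyRange (c + 1) ((row.length : Int)) 1 := by
            rw [PySem.List.mem_pyRange_one]
            push_cast
            omega
          have hgd : PySem.List.pyGetD row (((c + 1).toNat + k : Nat) : Int) "" = "Q" := by
            rw [PySem.List.pyGetD_eq_getElem _ _ (by positivity) (by exact_mod_cast hklen)]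
            simp only [Int.toNat_natCast]
            exact hgetk
          have hne := pvFirstQ_isSome_of_mem row _ _ hmem hgd
          obtain ⟨j0, hj0⟩ := Option.ne_none_iff_exists'.mp hne
          have hsplit : PySem.List.pyRange (c + 1) 8 1
              = PySem.List.pyRange (c + 1) ((row.length : Int)) 1
                ++ PySem.List.pyRange ((row.length : Int)) 8 1 :=
            PySem.List.pyRange_one_append (c + 1) ((row.length : Int)) 8 hc1 (by omega)
          have hin1 : ∀ j ∈ PySem.List.pyRange (c + 1) ((row.length : Int)) 1,
              PySem.Raise.InRange row.length j := by
            intro j hj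
            have := PySem.List.mem_pyRange_one.mp hj
            constructor <;> omega
          rw [hsplit, pvFindQ_found row r _ _ acc j0 hj0 hin1,
            pvRightEqSmall row c h0 hc1 (by omega),
            ← pvFirstQ_asc row _ (PySem.List.pairwise_lt_pyRange_one (c + 1) ((row.length : Int))),
            hj0]
    rw [eqL, eqR]
  · rw [if_neg hQ]
    have hnil : (PySem.List.pyRange 0 ((row.length : Int)) 1).filter
        (fun j => PySem.List.pyGetD row j "" == "Q") = [] := by
      rw [List.filter_eq_nil_iff]
      intro j hj
      have hjr := PySem.List.mem_pyRange_one.mp hj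
      simp only [beq_iff_eq]
      intro heq
      exact hQ (heq ▸ PySem.List.pyGetD_mem row "" (by constructor <;> omega))
    rw [hnil]
    have hm1 : PySem.List.max? ([] : List Int) (fun y => y) = none :=
      (PySem.List.max?_eq_none_iff _ _).mpr rfl
    have hm2 : PySem.List.min? ([] : List Int) (fun y => y) = none :=
      (PySem.List.min?_eq_none_iff _ _).mpr rfl
    simp [hm1, hm2]
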